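-- pv_equiv track=rewrite | github.com/jbrooks0624/DEF_14A_Scraper_POC | scraper.py | extract_context_around_phrases
-- ===== SOURCE A (Python) =====
-- def extract_context_around_phrases(text, phrases, context_chars=100):
--
--     results = []
--     text_lower = text.lower()
--
--     for phrase in phrases:
--         phrase_lower = phrase.lower()
--         start_pos = 0
--
--         # Find all occurrences of the phrase
--         while True:
--             pos = text_lower.find(phrase_lower, start_pos)
--             if pos == -1:
--                 break
--
--             # Extract context before and after
--             start = max(0, pos - context_chars)
--             end = min(len(text), pos + len(phrase) + context_chars)
--
--             context_block = text[start:end]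
--             results.append(context_block)
--
--             # Move to next potential occurrence
--             start_pos = pos + 1
--
--     return results
-- ===== SOURCE B (Python) =====
-- def extract_context_around_phrases(text, phrases, context_chars=100):
--     results = []
--     text_lower = text.lower()
--     n = len(text)
--
--     for phrase in phrases:
--         phrase_lower = phrase.lower()
--         # Scan every start position (inclusive of n: '' matches there too),
--         # instead of the while/find loop.
--         for i in range(n + 1):
--             if text_lower.startswith(phrase_lower, i):
--                 start = max(0, i - context_chars)
--                 end = min(n, i + len(phrase) + context_chars)
--                 results.append(text[start:end])
--
--     return results
-- ===== Notes on version B (the rewrite author's own statement) =====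
-- stated objective: alternative
-- what changed: Replaces A's while/str.find loop (restarting the search at pos+1) with a single scan over every start position i in range(len(text)+1) testing text_lower.startswith(phrase_lower, i), which enumerates the same overlapping occurrences in the same order.
import Mathlib
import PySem

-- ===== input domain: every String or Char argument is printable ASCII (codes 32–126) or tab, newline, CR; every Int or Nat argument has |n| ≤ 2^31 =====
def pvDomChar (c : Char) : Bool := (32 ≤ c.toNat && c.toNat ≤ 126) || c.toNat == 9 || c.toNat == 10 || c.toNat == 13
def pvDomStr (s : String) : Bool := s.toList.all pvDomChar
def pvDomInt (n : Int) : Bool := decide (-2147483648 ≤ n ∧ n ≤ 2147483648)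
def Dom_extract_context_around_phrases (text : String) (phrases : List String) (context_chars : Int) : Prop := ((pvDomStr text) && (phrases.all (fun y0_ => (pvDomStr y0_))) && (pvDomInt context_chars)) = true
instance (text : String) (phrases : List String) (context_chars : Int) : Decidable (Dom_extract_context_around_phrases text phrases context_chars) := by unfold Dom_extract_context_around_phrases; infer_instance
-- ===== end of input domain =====

-- B replaces A's while/str.find scan with a single pass over every start position
-- using startswith (same order, same overlapping occurrences); objective: alternative
-- decomposition, not speed.

-- ===== PORT A =====
-- three helper lemmas needed by pvLoopA's termination proof (cited in decreasing_by)
theorem pvFind_nil (s : List Char) : PySem.Chars.find s [] = 0 := by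
  cases s <;> simp [PySem.Chars.find, PySem.Chars.find.go]

theorem pvFindFrom_high (s sub : List Char) (k : Nat) (h : s.length < k) :
    PySem.Chars.findFrom s sub (k : Int) = -1 := by
  have h0 : ¬ ((k : Int) < 0) := by omega
  have h1 : ((s.length : Int) < (k : Int)) := by exact_mod_cast h
  simp [PySem.Chars.findFrom, h0, h1]

theorem pvFindFrom_bounds (s sub : List Char) (k : Nat)
    (h : PySem.Chars.findFrom s sub (k : Int) ≠ -1) :
    k ≤ s.length ∧ (k : Int) ≤ PySem.Chars.findFrom s sub (k : Int) ∧
      k ≤ (PySem.Chars.findFrom s sub (k : Int)).toNat ∧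
      (PySem.Chars.findFrom s sub (k : Int)).toNat ≤ s.length := by
  have hk : k ≤ s.length := by
    by_contra hk'
    exact h (pvFindFrom_high s sub k (by omega))
  obtain ⟨h1, h2, _⟩ := PySem.Chars.findFrom_natCast_spec s sub k hk h
  refine ⟨hk, h1, by omega, ?_⟩
  by_cases hsub : sub = []
  · subst hsub
    rw [PySem.Chars.findFrom_natCast s [] k hk, pvFind_nil]
    simp
    omega
  · have hlen : 1 ≤ sub.length := by
      cases sub with
      | nil => exact absurd rfl hsub
      | cons a t => simp
    have := List.IsPrefix.length_le h2
    simp at this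
    omega

-- the while-loop of A: find next occurrence from start_pos, append the context block,
-- continue from pos+1
def pvLoopA (text tl pl : List Char) (plen : Nat) (cc : Int) (start_pos : Nat)
    (acc : List String) : List String :=
  let pos := PySem.Chars.findFrom tl pl (start_pos : Int)
  if h : pos = -1 then acc
  else
    pvLoopA text tl pl plen cc (pos.toNat + 1)
      (acc ++ [String.ofList (PySem.Chars.slice text
        (some (max 0 (pos - cc)))
        (some (min ((text.length : Int)) (pos + (plen : Int) + cc))))])
termination_by tl.length + 1 - start_pos
decreasing_by
  have hb := pvFindFrom_bounds tl pl start_pos h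
  omega

def extract_context_around_phrases (text : String) (phrases : List String)
    (context_chars : Int) : List String :=
  let text_lower := PySem.Chars.lower text.toList
  phrases.foldl
    (fun results phrase =>
      pvLoopA text.toList text_lower (PySem.Chars.lower phrase.toList)
        phrase.toList.length context_chars 0 results)
    []

-- ===== PORT B =====
-- text_lower.startswith(phrase_lower, i) for 0 ≤ i ≤ len(text) is exactly
-- startswith on the i-th tail (Python clamps the start as a slice bound; here i ≤ len).
def extract_context_around_phrases_alt (text : String) (phrases : List String)
    (context_chars : Int) : List String :=
  let text_lower := PySem.Chars.lower text.toList
  let n := text.toList.length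
  phrases.foldl
    (fun results phrase =>
      let phrase_lower := PySem.Chars.lower phrase.toList
      (List.range (n + 1)).foldl
        (fun acc i =>
          if PySem.Chars.startswith (text_lower.drop i) phrase_lower then
            acc ++ [String.ofList (PySem.Chars.slice text.toList
              (some (max 0 ((i : Int) - context_chars)))
              (some (min ((n : Int)) ((i : Int) + (phrase.toList.length : Int) + context_chars))))]
          else acc)
        results)
    []

-- ===== PRECONDITION & SPEC =====
def Spec_extract_context_around_phrases (text : String) (phrases : List String) (context_chars : Int) (out : List String) : Prop := out = extract_context_around_phrases_alt text phrases context_chars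
instance (text : String) (phrases : List String) (context_chars : Int) (out : List String) : Decidable (Spec_extract_context_around_phrases text phrases context_chars out) := by unfold Spec_extract_context_around_phrases; infer_instance

-- ===== CLAIM (what is proved, stated in full; the proofs are below) =====
def Claim_equal_extract_context_around_phrases : Prop := ∀ (text : String) (phrases : List String) (context_chars : Int), Dom_extract_context_around_phrases text phrases context_chars → Spec_extract_context_around_phrases text phrases context_chars (extract_context_around_phrases text phrases context_chars)

-- ===== LEMMAS AND PROOFS =====
theorem pvLen_lower (s : List Char) : (PySem.Chars.lower s).length = s.length := by
  simp [PySem.Chars.lower]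

theorem pvFoldl_false (f : Nat → String) (cond : Nat → Bool) (l : List Nat)
    (acc : List String) (h : ∀ i ∈ l, cond i = false) :
    l.foldl (fun a i => if cond i then a ++ [f i] else a) acc = acc := by
  induction l generalizing acc with
  | nil => rfl
  | cons x xs ih =>
    simp only [List.foldl_cons, h x (by simp)]
    exact ih acc (fun i hi => h i (by simp [hi]))

theorem pvNoPrefix_of_no_infix (tl pl : List Char) (k i : Nat) (hki : k ≤ i)
    (hninf : ¬ pl <:+: tl.drop k) : ¬ pl <+: tl.drop i := by
  intro hp
  apply hninf
  have hdd : tl.drop i = (tl.drop k).drop (i - k) := by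
    rw [List.drop_drop]
    congr 1
    omega
  rw [hdd] at hp
  exact hp.isInfix.trans (List.drop_suffix _ _).isInfix

-- the heart of the proof: A's find-loop from position k computes exactly B's
-- startswith-scan over the positions k, k+1, …, tl.length
theorem pvLoopA_eq_scan (text tl pl : List Char) (plen : Nat) (cc : Int) :
    ∀ (m k : Nat) (acc : List String), tl.length + 1 - k = m →
    pvLoopA text tl pl plen cc k acc =
      (List.range' k (tl.length + 1 - k)).foldl
        (fun a i =>
          if PySem.Chars.startswith (tl.drop i) pl then
            a ++ [String.ofList (PySem.Chars.slice text
              (some (max 0 ((i : Int) - cc)))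
              (some (min ((text.length : Int)) ((i : Int) + (plen : Int) + cc))))]
          else a) acc := by
  intro m
  induction m using Nat.strong_induction_on with
  | _ m IH =>
    intro k acc hm
    rw [pvLoopA]
    by_cases hpos : PySem.Chars.findFrom tl pl (k : Int) = -1
    · simp only [hpos, dif_pos]
      by_cases hk : k ≤ tl.length
      · have hninf : ¬ pl <:+: tl.drop k :=
          (PySem.Chars.findFrom_natCast_eq_neg_one_iff tl pl k hk).mp hpos
        rw [pvFoldl_false]
        intro i hi
        rw [List.mem_range'_1] at hi
        cases hsw : PySem.Chars.startswith (tl.drop i) pl with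
        | false => rfl
        | true =>
          exact absurd ((PySem.Chars.startswith_iff _ _).mp hsw)
            (pvNoPrefix_of_no_infix tl pl k i hi.1 hninf)
      · have : tl.length + 1 - k = 0 := by omega
        rw [this]
        rfl
    · simp only [hpos, dif_neg, not_false_iff]
      obtain ⟨hk, hkI, hkp, hple⟩ := pvFindFrom_bounds tl pl k hpos
      obtain ⟨_, hpre, hmin⟩ := PySem.Chars.findFrom_natCast_spec tl pl k hk hpos
      set P := PySem.Chars.findFrom tl pl (k : Int) with hP
      have h0 : (0 : Int) ≤ P := le_trans (by exact_mod_cast Nat.zero_le k) hkI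
      have hcast : P = ((P.toNat : Nat) : Int) := (Int.toNat_of_nonneg h0).symm
      set p := P.toNat with hp
      -- split the scan range at p
      have hsplit : tl.length + 1 - k = (p - k) + (tl.length + 1 - p) := by omega
      rw [hsplit, ← List.range'_append_1, List.foldl_append,
        Nat.add_sub_cancel' hkp]
      have hfirst : (List.range' k (p - k)).foldl
          (fun a i =>
            if PySem.Chars.startswith (tl.drop i) pl then
              a ++ [String.ofList (PySem.Chars.slice text
                (some (max 0 ((i : Int) - cc)))
                (some (min ((text.length : Int)) ((i : Int) + (plen : Int) + cc))))]
            else a) acc = acc := by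
        apply pvFoldl_false
        intro i hi
        rw [List.mem_range'_1] at hi
        cases hsw : PySem.Chars.startswith (tl.drop i) pl with
        | false => rfl
        | true =>
          exact absurd ((PySem.Chars.startswith_iff _ _).mp hsw)
            (hmin i hi.1 (by omega))
      have hsucc : tl.length + 1 - p = (tl.length - p) + 1 := by omega
      have hsw : PySem.Chars.startswith (tl.drop p) pl = true :=
        (PySem.Chars.startswith_iff _ _).mpr hpre
      have hrest : tl.length - p = tl.length + 1 - (p + 1) := by omega
      rw [hfirst, hsucc, List.range'_succ, List.foldl_cons, hsw, if_pos rfl, hcast, hrest]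
      exact IH (tl.length + 1 - (p + 1)) (by omega) (p + 1) _ rfl

theorem pvOuter_eq (text : String) (context_chars : Int) :
    ∀ (phrases : List String) (acc : List String),
    phrases.foldl
      (fun results phrase =>
        pvLoopA text.toList (PySem.Chars.lower text.toList)
          (PySem.Chars.lower phrase.toList) phrase.toList.length context_chars 0 results)
      acc =
    phrases.foldl
      (fun results phrase =>
        (List.range (text.toList.length + 1)).foldl
          (fun a i =>
            if PySem.Chars.startswith ((PySem.Chars.lower text.toList).drop i)
                (PySem.Chars.lower phrase.toList) then
              a ++ [String.ofList (PySem.Chars.slice text.toList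
                (some (max 0 ((i : Int) - context_chars)))
                (some (min ((text.toList.length : Int))
                  ((i : Int) + (phrase.toList.length : Int) + context_chars))))]
            else a)
          results)
      acc := by
  intro phrases
  induction phrases with
  | nil => intro acc; rfl
  | cons ph rest ih =>
    intro acc
    simp only [List.foldl_cons]
    rw [pvLoopA_eq_scan text.toList (PySem.Chars.lower text.toList)
      (PySem.Chars.lower ph.toList) ph.toList.length context_chars
      ((PySem.Chars.lower text.toList).length + 1 - 0) 0 acc rfl]
    rw [pvLen_lower, Nat.sub_zero, ← List.range_eq_range']
    exact ih _

-- ===== VERDICT (by name: the statement is the Claim_ definition above) =====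
theorem extract_context_around_phrases_spec : Claim_equal_extract_context_around_phrases := by
  intro text phrases context_chars _
  unfold Spec_extract_context_around_phrases extract_context_around_phrases
    extract_context_around_phrases_alt
  exact pvOuter_eq text context_chars phrases []
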